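-- pv_equiv track=rewrite | github.com/dylanbrams/Classnotes | practice/change/pig_latin.py | find_consonant
-- ===== SOURCE A (Python) =====
-- VOWELS = 'aeiouy'
--
-- def find_consonant(word_in):
--     """
--
--     :param word_in:
--     :return:
--
--     >>> find_consonant("Green")
--     2
--
--     >>> find_consonant("orange")
--     0
--
--     >>> find_consonant("streetlight")
--     3
--
--     >>> find_consonant("aardvark")
--     0
--
--     >>> find_consonant("a")
--     0
--
--     """
--     vowel_place = 0
--     current_iteration = 0
--     for current_letter in word_in:
--         if current_letter in VOWELS:
--             vowel_place = current_iteration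
--             break
--         else:
--             current_iteration += 1
--     return vowel_place
-- ===== SOURCE B (Python) =====
-- VOWELS = 'aeiouy'
--
-- def find_consonant(word_in):
--     positions = [word_in.index(v) for v in VOWELS if v in word_in]
--     return min(positions) if positions else 0
-- ===== Notes on version B (the rewrite author's own statement) =====
-- stated objective: alternative
-- what changed: Instead of A's single left-to-right scan of the word with a position counter and break, B iterates the fixed 6-letter vowel alphabet, collects word_in.index(v) for each vowel present, and returns the minimum of those positions (0 if none).
import Mathlib
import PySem

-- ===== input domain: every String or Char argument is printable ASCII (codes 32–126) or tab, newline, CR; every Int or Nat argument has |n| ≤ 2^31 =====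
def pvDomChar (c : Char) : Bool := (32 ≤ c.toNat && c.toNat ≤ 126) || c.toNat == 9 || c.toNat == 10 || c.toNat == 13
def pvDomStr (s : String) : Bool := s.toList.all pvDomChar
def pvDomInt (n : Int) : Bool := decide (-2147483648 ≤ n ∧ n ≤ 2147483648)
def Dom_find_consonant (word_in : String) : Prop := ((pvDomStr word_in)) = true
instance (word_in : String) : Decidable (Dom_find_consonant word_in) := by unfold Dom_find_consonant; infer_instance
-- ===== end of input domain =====

-- B replaces A's single left-to-right scan by iterating the fixed vowel alphabet,
-- collecting word_in.index(v) for each vowel present and taking the minimum (0 if none):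
-- a different traversal of the same data (objective: alternative).


-- VOWELS = 'aeiouy' (module constant; 'c in VOWELS' for a single char is list membership)
def pvVOWELS : List Char := ['a', 'e', 'i', 'o', 'u', 'y']

-- ===== PORT A =====
-- the for-loop with break: state (vowel_place, current_iteration); break returns vowel_place = cur
def find_consonant_loop : List Char → Int → Int → Int
  | [], vowel_place, _ => vowel_place
  | current_letter :: rest, vowel_place, current_iteration =>
    if current_letter ∈ pvVOWELS then current_iteration
    else find_consonant_loop rest vowel_place (current_iteration + 1)

def find_consonant (word_in : String) : Int :=
  find_consonant_loop word_in.toList 0 0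

-- ===== PORT B =====
-- positions = [word_in.index(v) for v in VOWELS if v in word_in]
def pvPositions (cs : List Char) : List Int :=
  pvVOWELS.filterMap fun v =>
    if v ∈ cs then Option.map (fun k : Nat => (k : Int)) (PySem.List.index? cs v) else none

-- min(positions) if positions else 0
def find_consonant_alt (word_in : String) : Int :=
  match PySem.List.min? (pvPositions word_in.toList) (fun x => x) with
  | some m => m
  | none => 0

-- ===== PRECONDITION & SPEC =====
def Spec_find_consonant (word_in : String) (out : Int) : Prop := out = find_consonant_alt word_in
instance (word_in : String) (out : Int) : Decidable (Spec_find_consonant word_in out) := by unfold Spec_find_consonant; infer_instance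

-- ===== CLAIM (what is proved, stated in full; the proofs are below) =====
def Claim_equal_find_consonant : Prop := ∀ (word_in : String), Dom_find_consonant word_in → Spec_find_consonant word_in (find_consonant word_in)

-- ===== LEMMAS AND PROOFS =====

-- index (counted from the start of cs) of the first vowel of cs, if any
def pvFirstVowel : List Char → Option Nat
  | [] => none
  | c :: rest => if c ∈ pvVOWELS then some 0 else (pvFirstVowel rest).map (· + 1)

theorem pvFirstVowel_none_iff (cs : List Char) :
    pvFirstVowel cs = none ↔ ∀ c ∈ cs, c ∉ pvVOWELS := by
  induction cs with
  | nil => simp [pvFirstVowel]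
  | cons c rest ih =>
    by_cases hc : c ∈ pvVOWELS <;> simp [pvFirstVowel, hc, ih]

theorem pvFirstVowel_some (cs : List Char) (j : Nat) (h : pvFirstVowel cs = some j) :
    ∃ hj : j < cs.length, cs[j] ∈ pvVOWELS ∧ ∀ i (hi : i < cs.length), i < j → cs[i] ∉ pvVOWELS := by
  induction cs generalizing j with
  | nil => simp [pvFirstVowel] at h
  | cons c rest ih =>
    by_cases hc : c ∈ pvVOWELS
    · simp [pvFirstVowel, hc] at h
      subst h
      exact ⟨by simp, by simpa using hc, by omega⟩
    · simp [pvFirstVowel, hc] at h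
      obtain ⟨j', hj', rfl⟩ := h
      obtain ⟨hlt, hv, hmin⟩ := ih j' hj'
      refine ⟨by simpa using Nat.succ_lt_succ hlt, by simpa using hv, ?_⟩
      intro i hi hij
      cases i with
      | zero => simpa using hc
      | succ i' =>
        have := hmin i' (by simpa using Nat.lt_of_succ_lt_succ hi) (Nat.lt_of_succ_lt_succ hij)
        simpa using this

theorem find_consonant_loop_eq (cs : List Char) (vp cur : Int) :
    find_consonant_loop cs vp cur =
      match pvFirstVowel cs with
      | some j => cur + j
      | none => vp := by
  induction cs generalizing cur with
  | nil => simp [find_consonant_loop, pvFirstVowel]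
  | cons c rest ih =>
    by_cases hc : c ∈ pvVOWELS
    · simp [find_consonant_loop, pvFirstVowel, hc]
    · simp only [find_consonant_loop, pvFirstVowel, hc, if_false, ih]
      cases h : pvFirstVowel rest with
      | none => simp
      | some j => simp; ring

theorem pvPositions_none (cs : List Char) (h : pvFirstVowel cs = none) :
    pvPositions cs = [] := by
  rw [pvFirstVowel_none_iff] at h
  unfold pvPositions
  rw [List.filterMap_eq_nil_iff]
  intro v hv
  have : v ∉ cs := fun hvc => h v hvc hv
  simp [this]

theorem pvPositions_mem (cs : List Char) (j : Nat) (h : pvFirstVowel cs = some j) :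
    (j : Int) ∈ pvPositions cs ∧ ∀ p ∈ pvPositions cs, (j : Int) ≤ p := by
  obtain ⟨hj, hv, hmin⟩ := pvFirstVowel_some cs j h
  constructor
  · -- witness vowel: cs[j] itself
    have hmem : cs[j] ∈ cs := List.getElem_mem hj
    have hsome : (PySem.List.index? cs cs[j]).isSome := by
      rw [PySem.List.index?_isSome_iff]; exact hmem
    obtain ⟨k, hk⟩ := Option.isSome_iff_exists.mp hsome
    obtain ⟨hkl, hck, hkfirst⟩ := PySem.List.getElem_of_index?_eq_some hk
    have hkj : k = j := by
      rcases Nat.lt_trichotomy k j with hlt | heq | hgt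
      · exact absurd (hck ▸ hv) (hmin k hkl hlt)
      · exact heq
      · exact absurd rfl (hkfirst j hgt)
    have hk' : PySem.List.index? cs cs[j] = some j := hkj ▸ hk
    unfold pvPositions
    rw [List.mem_filterMap]
    exact ⟨cs[j], hv, by rw [if_pos hmem, hk', Option.map_some]⟩
  · intro p hp
    unfold pvPositions at hp
    rw [List.mem_filterMap] at hp
    obtain ⟨v, hvV, hf⟩ := hp
    by_cases hvc : v ∈ cs
    · simp only [hvc, if_true, Option.map_eq_some_iff] at hf
      obtain ⟨k, hk, hkp⟩ := hf
      subst hkp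
      obtain ⟨hkl, hck, _⟩ := PySem.List.getElem_of_index?_eq_some hk
      have : ¬ k < j := fun hlt => (hmin k hkl hlt) (hck ▸ hvV)
      exact_mod_cast Nat.le_of_not_lt this
    · simp [hvc] at hf

theorem find_consonant_alt_eq (w : String) :
    find_consonant_alt w =
      match pvFirstVowel w.toList with
      | some j => (j : Int)
      | none => 0 := by
  unfold find_consonant_alt
  cases h : pvFirstVowel w.toList with
  | none =>
    rw [pvPositions_none w.toList h]
    simp [PySem.List.min?]
  | some j =>
    obtain ⟨hmem, hle⟩ := pvPositions_mem w.toList j h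
    have hne : pvPositions w.toList ≠ [] := fun he => by simp [he] at hmem
    cases hm : PySem.List.min? (pvPositions w.toList) (fun x => x) with
    | none =>
      cases hps : pvPositions w.toList with
      | nil => exact absurd hps hne
      | cons a t => rw [hps, PySem.List.min?_id_cons] at hm; cases hm
    | some m =>
      have hmmem := PySem.List.min?_mem hm
      have h1 : m ≤ (j : Int) := PySem.List.min?_isMin hm _ hmem
      have h2 : (j : Int) ≤ m := hle m hmmem
      show m = (j : Int)
      omega

-- ===== VERDICT (by name: the statement is the Claim_ definition above) =====
theorem find_consonant_spec : Claim_equal_find_consonant := by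
  intro w _
  unfold Spec_find_consonant find_consonant
  rw [find_consonant_loop_eq, find_consonant_alt_eq w]
  cases pvFirstVowel w.toList <;> simp
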